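-- pv_equiv track=rewrite | github.com/wduquette/st2-packages | paredit/shared.py | bracket_count
-- ===== SOURCE A (Python) =====
-- def bracket_count(text, left_bracket, right_bracket, return_on_right_bracket=True):
-- 	count = 0
-- 	for c in text:
-- 		if c == left_bracket:
-- 			count += 1
-- 		elif c == right_bracket:
-- 			count -= 1
-- 		if return_on_right_bracket and count < 0:
-- 			return count
-- 	return count
-- ===== SOURCE B (Python) =====
-- def bracket_count(text, left_bracket, right_bracket, return_on_right_bracket=True):
--     # Pass 1: map each character to a delta (elif precedence: left wins when left == right).
--     deltas = [1 if c == left_bracket else (-1 if c == right_bracket else 0) for c in text]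
--     # Pass 2: materialize the prefix sums.
--     prefix = []
--     s = 0
--     for d in deltas:
--         s += d
--         prefix.append(s)
--     # Pass 3: first negative prefix sum if requested, otherwise the final balance.
--     if return_on_right_bracket:
--         for v in prefix:
--             if v < 0:
--                 return v
--     return prefix[-1] if prefix else 0
-- ===== Notes on version B (the rewrite author's own statement) =====
-- stated objective: alternative
-- what changed: Replaces A's single running-counter loop with early exit by a three-phase pipeline: map characters to integer deltas, materialize the prefix-sum list, then either scan for the first negative prefix or take the last one.
import Mathlib
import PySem

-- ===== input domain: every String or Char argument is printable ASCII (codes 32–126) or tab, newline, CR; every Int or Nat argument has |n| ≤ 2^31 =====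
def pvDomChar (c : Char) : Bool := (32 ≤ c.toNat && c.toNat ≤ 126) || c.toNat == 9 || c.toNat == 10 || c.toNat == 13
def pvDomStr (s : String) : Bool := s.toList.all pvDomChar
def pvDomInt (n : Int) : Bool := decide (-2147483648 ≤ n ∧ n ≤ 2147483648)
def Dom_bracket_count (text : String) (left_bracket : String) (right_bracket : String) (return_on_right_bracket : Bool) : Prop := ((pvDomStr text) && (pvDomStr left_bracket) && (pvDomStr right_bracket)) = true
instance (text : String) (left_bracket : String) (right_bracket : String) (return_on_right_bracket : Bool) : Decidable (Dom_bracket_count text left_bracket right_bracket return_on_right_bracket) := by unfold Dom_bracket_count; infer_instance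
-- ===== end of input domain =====

-- B replaces A's early-exit counter loop by a map-to-deltas / prefix-sum / search pipeline (alternative decomposition, same cost).

-- ===== PORT A =====
-- A's for-loop with early return, as structural recursion over the characters with the running count.
def bracketCountLoop (cs : List Char) (left_bracket right_bracket : String) (ror : Bool) (count : Int) : Int :=
  match cs with
  | [] => count
  | c :: rest =>
    let count1 := if String.ofList [c] = left_bracket then count + 1
                  else if String.ofList [c] = right_bracket then count - 1
                  else count
    if ror = true ∧ count1 < 0 then count1
    else bracketCountLoop rest left_bracket right_bracket ror count1

def bracket_count (text : String) (left_bracket : String) (right_bracket : String) (return_on_right_bracket : Bool) : Int :=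
  bracketCountLoop text.toList left_bracket right_bracket return_on_right_bracket 0

-- ===== PORT B =====
-- Pass 1 of Source B: the delta list comprehension.
def deltasOf (left_bracket right_bracket : String) (cs : List Char) : List Int :=
  cs.map (fun c => if String.ofList [c] = left_bracket then (1 : Int)
                   else if String.ofList [c] = right_bracket then -1 else 0)

-- Pass 2 of Source B: materialize the prefix sums (accumulator s, appended element by element).
def prefixSums (deltas : List Int) (s : Int) : List Int :=
  match deltas with
  | [] => []
  | d :: rest => (s + d) :: prefixSums rest (s + d)

def bracket_count_alt (text : String) (left_bracket : String) (right_bracket : String) (return_on_right_bracket : Bool) : Int :=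
  let deltas := deltasOf left_bracket right_bracket text.toList
  let pre := prefixSums deltas 0
  if return_on_right_bracket then
    match pre.find? (fun v => decide (v < 0)) with
    | some v => v
    | none => pre.getLast?.getD 0
  else pre.getLast?.getD 0

-- ===== PRECONDITION & SPEC =====
def Spec_bracket_count (text : String) (left_bracket : String) (right_bracket : String) (return_on_right_bracket : Bool) (out : Int) : Prop := out = bracket_count_alt text left_bracket right_bracket return_on_right_bracket
instance (text : String) (left_bracket : String) (right_bracket : String) (return_on_right_bracket : Bool) (out : Int) : Decidable (Spec_bracket_count text left_bracket right_bracket return_on_right_bracket out) := by unfold Spec_bracket_count; infer_instance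

-- ===== CLAIM (what is proved, stated in full; the proofs are below) =====
def Claim_equal_bracket_count : Prop := ∀ (text : String) (left_bracket : String) (right_bracket : String) (return_on_right_bracket : Bool), Dom_bracket_count text left_bracket right_bracket return_on_right_bracket → Spec_bracket_count text left_bracket right_bracket return_on_right_bracket (bracket_count text left_bracket right_bracket return_on_right_bracket)

-- ===== LEMMAS AND PROOFS =====
theorem getLast_cons_getD (x y : Int) (l : List Int) :
    (x :: l).getLast?.getD y = l.getLast?.getD x := by
  cases l with
  | nil => simp
  | cons a t =>
    cases h : (a :: t).getLast? with
    | none => simp [List.getLast?_eq_none_iff] at h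
    | some v => simp [h]

/-- A's loop from any starting count equals B's pipeline computed on the
    prefix sums started at that count (with the empty default `count`). -/
theorem loop_eq_pipeline (left_bracket right_bracket : String) (ror : Bool)
    (cs : List Char) (count : Int) :
    bracketCountLoop cs left_bracket right_bracket ror count =
      (let pre := prefixSums (deltasOf left_bracket right_bracket cs) count
       if ror then
         match pre.find? (fun v => decide (v < 0)) with
         | some v => v
         | none => pre.getLast?.getD count
       else pre.getLast?.getD count) := by
  induction cs generalizing count with
  | nil =>
    cases ror <;> simp [bracketCountLoop, deltasOf, prefixSums]
  | cons c rest ih =>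
    simp only [bracketCountLoop, deltasOf, List.map_cons, prefixSums]
    set d : Int := if String.ofList [c] = left_bracket then (1 : Int)
                   else if String.ofList [c] = right_bracket then -1 else 0 with hd
    have hcount1 : (if String.ofList [c] = left_bracket then count + 1
        else if String.ofList [c] = right_bracket then count - 1 else count) = count + d := by
      rw [hd]; split_ifs <;> ring
    rw [hcount1]
    cases ror with
    | false =>
      simp only [false_and, Bool.false_eq_true, if_false]
      rw [ih]
      simp [deltasOf, getLast_cons_getD]
    | true =>
      by_cases hneg : count + d < 0
      · simp [hneg]
      · simp only [true_and, hneg, if_false, if_true, List.find?_cons]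
        rw [ih]
        simp only [if_true, deltasOf]
        cases hfind : List.find? (fun v => decide (v < 0))
            (prefixSums (List.map (fun c => if String.ofList [c] = left_bracket then (1 : Int)
              else if String.ofList [c] = right_bracket then -1 else 0) rest) (count + d)) with
        | some v => simp
        | none => simp [getLast_cons_getD]

-- ===== VERDICT (by name: the statement is the Claim_ definition above) =====
theorem bracket_count_spec : Claim_equal_bracket_count := by
  intro text lb rb ror _
  unfold Spec_bracket_count bracket_count bracket_count_alt
  rw [loop_eq_pipeline]
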